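-- pv_equiv track=rewrite | github.com/collinear-ai/simlab | src/simlab/cli/env.py | _categorize_docs
-- ===== SOURCE A (Python) =====
-- _DOC_PREFIXES = {
--     "Employee Records": "Employee Record: ",
--     "Health Enrollments": "Health Enrollment: ",
--     "Job Requisitions": "Job Requisition: ",
--     "NPC Personas": "NPC Persona: ",
--     "Candidate Applications": "Candidate Application: ",
-- }
--
-- def _categorize_docs(titles: list[str]) -> dict[str, list[str]]:
--     """Categorize document titles by known prefix into buckets."""
--     categories: dict[str, list[str]] = {k: [] for k in _DOC_PREFIXES}
--     categories["Policies"] = []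
--     for title in titles:
--         matched = False
--         for cat, prefix in _DOC_PREFIXES.items():
--             if title.startswith(prefix):
--                 categories[cat].append(title)
--                 matched = True
--                 break
--         if not matched:
--             categories["Policies"].append(title)
--     return categories
-- ===== SOURCE B (Python) =====
-- _DOC_PREFIXES = {
--     "Employee Records": "Employee Record: ",
--     "Health Enrollments": "Health Enrollment: ",
--     "Job Requisitions": "Job Requisition: ",
--     "NPC Personas": "NPC Persona: ",
--     "Candidate Applications": "Candidate Application: ",
-- }
--
-- _PREFIX_TO_CAT = {p: c for c, p in _DOC_PREFIXES.items()}
--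
-- def _categorize_docs(titles: list[str]) -> dict[str, list[str]]:
--     """Categorize document titles by known prefix into buckets."""
--     buckets: dict[str, list[str]] = {c: [] for c in _DOC_PREFIXES}
--     buckets["Policies"] = []
--     for title in titles:
--         i = title.find(": ")
--         cat = "Policies" if i == -1 else _PREFIX_TO_CAT.get(title[:i + 2], "Policies")
--         buckets[cat].append(title)
--     return buckets
-- ===== Notes on version B (the rewrite author's own statement) =====
-- stated objective: faster
-- what changed: Replaces the inner scan over the five prefixes by a single title.find(': ') plus one lookup in a precomputed prefix-to-category reverse table.
import Mathlib
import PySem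

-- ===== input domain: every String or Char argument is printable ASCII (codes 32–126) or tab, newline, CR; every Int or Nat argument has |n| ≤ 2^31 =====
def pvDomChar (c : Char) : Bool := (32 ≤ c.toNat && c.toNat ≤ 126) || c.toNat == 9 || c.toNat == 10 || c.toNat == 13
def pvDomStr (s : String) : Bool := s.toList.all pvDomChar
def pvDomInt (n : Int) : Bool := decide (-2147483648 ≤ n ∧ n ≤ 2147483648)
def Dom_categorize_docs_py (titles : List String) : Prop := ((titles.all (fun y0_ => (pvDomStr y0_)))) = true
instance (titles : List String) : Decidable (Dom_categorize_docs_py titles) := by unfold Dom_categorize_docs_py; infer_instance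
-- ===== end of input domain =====

-- B replaces A's inner loop over the five prefixes by one find(': ') and a reverse-table lookup (idiomatic; same asymptotic cost).

-- ===== PORT A =====
-- _DOC_PREFIXES as an insertion-ordered association list
def pvDocPrefixes : List (String × String) :=
  [("Employee Records", "Employee Record: "),
   ("Health Enrollments", "Health Enrollment: "),
   ("Job Requisitions", "Job Requisition: "),
   ("NPC Personas", "NPC Persona: "),
   ("Candidate Applications", "Candidate Application: ")]

def categorize_docs_py (titles : List String) : List (String × List String) :=
  -- categories = {k: [] for k in _DOC_PREFIXES}; categories["Policies"] = []
  let cats0 : PySem.Dict String (List String) :=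
    pvDocPrefixes.foldl (fun d p => d.insert p.1 ([] : List String)) PySem.Dict.empty
  let cats1 := cats0.insert "Policies" []
  -- for title in titles: inner for over prefixes with break (modelled by the matched flag)
  let final := titles.foldl (fun cats title =>
    let res := pvDocPrefixes.foldl
      (fun (st : PySem.Dict String (List String) × Bool) p =>
        if st.2 then st
        else if PySem.Str.startswith title p.2 then (st.1.modify p.1 [] (fun l => l ++ [title]), true)
        else st) (cats, false)
    if res.2 then res.1 else res.1.modify "Policies" [] (fun l => l ++ [title])) cats1
  final.items

-- ===== PORT B =====
-- _PREFIX_TO_CAT = {p: c for c, p in _DOC_PREFIXES.items()}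
def pvPrefixToCat : PySem.Dict String String :=
  PySem.Dict.ofList (pvDocPrefixes.map (fun p => (p.2, p.1)))

-- cat for one title: "Policies" if title.find(': ') == -1 else _PREFIX_TO_CAT.get(title[:i+2], "Policies")
def pvClassify (title : String) : String :=
  let i := PySem.Str.find title ": "
  if i == -1 then "Policies"
  else (pvPrefixToCat.get? (PySem.Str.slice title none (some (i + 2)))).getD "Policies"

def categorize_docs_py_alt (titles : List String) : List (String × List String) :=
  -- buckets = {c: [] for c in _DOC_PREFIXES}; buckets["Policies"] = []
  let buckets : PySem.Dict String (List String) :=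
    (pvDocPrefixes.foldl (fun d p => d.insert p.1 ([] : List String)) PySem.Dict.empty).insert "Policies" []
  (titles.foldl (fun b t => b.modify (pvClassify t) [] (fun l => l ++ [t])) buckets).items

-- ===== PRECONDITION & SPEC =====
def Spec_categorize_docs_py (titles : List String) (out : List (String × List String)) : Prop := out = categorize_docs_py_alt titles
instance (titles : List String) (out : List (String × List String)) : Decidable (Spec_categorize_docs_py titles out) := by unfold Spec_categorize_docs_py; infer_instance

-- ===== CLAIM (what is proved, stated in full; the proofs are below) =====
def Claim_equal_categorize_docs_py : Prop := ∀ (titles : List String), Dom_categorize_docs_py titles → Spec_categorize_docs_py titles (categorize_docs_py titles)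

-- ===== LEMMAS AND PROOFS =====

-- find on a string of shape q ++ ": " ++ r with no ':' in q points at q.length
theorem pv_find_colon_space (q r : List Char) (hq : ':' ∉ q) :
    PySem.Chars.find (q ++ ':' :: ' ' :: r) [':', ' '] = (q.length : Int) := by
  set s := q ++ ':' :: ' ' :: r with hs
  have hocc : [':', ' '] <+: s.drop q.length := by
    rw [hs, List.drop_left]
    exact ⟨r, rfl⟩
  have hinf : [':', ' '] <:+: s :=
    List.infix_iff_prefix_suffix.mpr ⟨_, hocc, List.drop_suffix _ _⟩
  have h0 : 0 ≤ PySem.Chars.find s [':', ' '] := (PySem.Chars.find_nonneg_iff s [':', ' ']).mpr hinf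
  obtain ⟨hpre, hmin⟩ := PySem.Chars.find_spec h0
  have hub : (PySem.Chars.find s [':', ' ']).toNat ≤ q.length := by
    by_contra hlt
    push Not at hlt
    exact hmin q.length hlt hocc
  have hlb : ¬ (PySem.Chars.find s [':', ' ']).toNat < q.length := by
    intro hi
    rcases hpre with ⟨u, hu⟩
    have h0' : s[(PySem.Chars.find s [':', ' ']).toNat]? = some ':' := by
      have : (s.drop (PySem.Chars.find s [':', ' ']).toNat)[0]? = some ':' := by
        rw [← hu]; rfl
      simpa [List.getElem?_drop] using this
    rw [hs, List.getElem?_append_left (by omega)] at h0'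
    exact hq (List.mem_of_getElem? h0')
  omega

-- a matched prefix p = q ++ ": " (no ':' in q) forces find = |q| and the table lookup to hit p's category
theorem pv_classify_aux (t c p : String) (q : List Char)
    (hp : p.toList = q ++ [':', ' ']) (hq : ':' ∉ q)
    (hget : pvPrefixToCat.get? p = some c)
    (h : PySem.Str.startswith t p = true) : pvClassify t = c := by
  have hpre : p.toList <+: t.toList := by
    have := PySem.Chars.startswith_iff (t.toList) (p.toList)
    simp only [PySem.Str.startswith_eq] at h
    exact this.mp h
  obtain ⟨r, hr⟩ := hpre
  have hsplit : t.toList = q ++ ':' :: ' ' :: r := by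
    rw [← hr, hp, List.append_assoc]; rfl
  have hfind : PySem.Chars.find t.toList [':', ' '] = (q.length : Int) := by
    rw [hsplit]; exact pv_find_colon_space q r hq
  have hlen : p.toList.length = q.length + 2 := by rw [hp]; simp
  have hcand : PySem.Str.slice t none (some ((q.length : Int) + 2)) = p := by
    apply String.toList_inj.mp
    rw [PySem.Str.toList_slice]
    have h2 : ((q.length : Int) + 2) = ((q.length + 2 : Nat) : Int) := by push_cast; ring
    rw [h2, PySem.Chars.slice_eq_listSlice, PySem.List.slice_to _ (by positivity)]
    have : ((q.length + 2 : Nat) : Int).toNat = p.toList.length := by omega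
    rw [this, ← hr, List.take_left]
  have hfind' : PySem.Str.find t ": " = (q.length : Int) := by
    have : (": " : String).toList = [':', ' '] := by decide
    simp only [PySem.Str.find_eq, this, hfind]
  unfold pvClassify
  rw [hfind']
  have hne : ((q.length : Int) == -1) = false := by simp
  dsimp only
  simp only [hne, Bool.false_eq_true, if_false, hcand, hget, Option.getD_some]

-- a matched prefix determines pvClassify
theorem pv_classify_of_prefix (t : String) (c p : String)
    (hmem : (c, p) ∈ pvDocPrefixes) (h : PySem.Str.startswith t p = true) :
    pvClassify t = c := by
  simp only [pvDocPrefixes, List.mem_cons, List.not_mem_nil, or_false, Prod.mk.injEq] at hmem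
  rcases hmem with ⟨rfl, rfl⟩ | ⟨rfl, rfl⟩ | ⟨rfl, rfl⟩ | ⟨rfl, rfl⟩ | ⟨rfl, rfl⟩
  · exact pv_classify_aux t _ _ ("Employee Record".toList) (by decide) (by decide) (by decide) h
  · exact pv_classify_aux t _ _ ("Health Enrollment".toList) (by decide) (by decide) (by decide) h
  · exact pv_classify_aux t _ _ ("Job Requisition".toList) (by decide) (by decide) (by decide) h
  · exact pv_classify_aux t _ _ ("NPC Persona".toList) (by decide) (by decide) (by decide) h
  · exact pv_classify_aux t _ _ ("Candidate Application".toList) (by decide) (by decide) (by decide) h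

-- no prefix matches → Policies
theorem pv_classify_none (t : String)
    (h : ∀ cp ∈ pvDocPrefixes, PySem.Str.startswith t cp.2 = false) :
    pvClassify t = "Policies" := by
  unfold pvClassify
  dsimp only
  by_cases hi : (PySem.Str.find t ": " == -1) = true
  · rw [if_pos hi]
  · have h0 : 0 ≤ PySem.Str.find t ": " := by
      have h1 : -1 ≤ PySem.Chars.find t.toList (": ").toList := PySem.Chars.neg_one_le_find _ _
      simp only [PySem.Str.find_eq] at *
      simp only [beq_iff_eq] at hi
      omega
    have hcandpre : (PySem.Str.slice t none (some (PySem.Str.find t ": " + 2))).toList <+: t.toList := by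
      rw [PySem.Str.toList_slice, PySem.Chars.slice_eq_listSlice, PySem.List.slice_to _ (by omega)]
      exact List.take_prefix _ _
    have hsw : ∀ p : String, (PySem.Str.slice t none (some (PySem.Str.find t ": " + 2))) = p →
        PySem.Str.startswith t p = true := by
      intro p hp
      rw [← hp]
      simp only [PySem.Str.startswith_eq]
      exact (PySem.Chars.startswith_iff _ _).mpr hcandpre
    have hget : pvPrefixToCat.get? (PySem.Str.slice t none (some (PySem.Str.find t ": " + 2))) = none := by
      rcases ho : pvPrefixToCat.get? (PySem.Str.slice t none (some (PySem.Str.find t ": " + 2))) with _ | c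
      · rfl
      · exfalso
        have hk : (PySem.Str.slice t none (some (PySem.Str.find t ": " + 2))) ∈ pvPrefixToCat.keys := by
          by_contra hnk
          rw [(PySem.Dict.get?_eq_none_iff_not_mem_keys _ _).mpr hnk] at ho
          simp at ho
        have hkeys : pvPrefixToCat.keys = ["Employee Record: ", "Health Enrollment: ",
            "Job Requisition: ", "NPC Persona: ", "Candidate Application: "] := by decide
        rw [hkeys] at hk
        simp only [List.mem_cons, List.not_mem_nil, or_false] at hk
        rcases hk with hk | hk | hk | hk | hk
        · exact absurd (hsw _ hk) (by simpa using h ("Employee Records", "Employee Record: ") (by decide))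
        · exact absurd (hsw _ hk) (by simpa using h ("Health Enrollments", "Health Enrollment: ") (by decide))
        · exact absurd (hsw _ hk) (by simpa using h ("Job Requisitions", "Job Requisition: ") (by decide))
        · exact absurd (hsw _ hk) (by simpa using h ("NPC Personas", "NPC Persona: ") (by decide))
        · exact absurd (hsw _ hk) (by simpa using h ("Candidate Applications", "Candidate Application: ") (by decide))
    rw [if_neg hi, hget]
    rfl

-- characterization of A's inner break-loop: the first matching prefix wins
theorem pv_fold_true (title : String) (l : List (String × String)) (st : PySem.Dict String (List String) × Bool) (h : st.2 = true) :
    l.foldl (fun (st : PySem.Dict String (List String) × Bool) p =>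
        if st.2 then st
        else if PySem.Str.startswith title p.2 then (st.1.modify p.1 [] (fun l => l ++ [title]), true)
        else st) st = st := by
  induction l with
  | nil => rfl
  | cons p l ih => simp only [List.foldl_cons, h, if_true]; exact ih

theorem pv_fold_char (title : String) (cats : PySem.Dict String (List String)) (l : List (String × String)) :
    l.foldl (fun (st : PySem.Dict String (List String) × Bool) p =>
        if st.2 then st
        else if PySem.Str.startswith title p.2 then (st.1.modify p.1 [] (fun l => l ++ [title]), true)
        else st) (cats, false) =
    match l.find? (fun p => PySem.Str.startswith title p.2) with
    | some p => (cats.modify p.1 [] (fun l => l ++ [title]), true)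
    | none => (cats, false) := by
  induction l with
  | nil => rfl
  | cons p l ih =>
    by_cases h : PySem.Str.startswith title p.2 = true
    · rw [List.find?_cons_of_pos (by simpa using h)]
      simp only [List.foldl_cons, Bool.false_eq_true, if_false, h, if_true]
      exact pv_fold_true title l ((cats.modify p.1 [] fun l => l ++ [title]), true) rfl
    · rw [List.find?_cons_of_neg (by simpa using h)]
      simp only [List.foldl_cons, Bool.false_eq_true, if_false, h]
      exact ih

-- A's per-title step is exactly B's per-title step
theorem pv_step_eq (cats : PySem.Dict String (List String)) (title : String) :
    (let res := pvDocPrefixes.foldl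
      (fun (st : PySem.Dict String (List String) × Bool) p =>
        if st.2 then st
        else if PySem.Str.startswith title p.2 then (st.1.modify p.1 [] (fun l => l ++ [title]), true)
        else st) (cats, false)
     if res.2 then res.1 else res.1.modify "Policies" [] (fun l => l ++ [title])) =
    cats.modify (pvClassify title) [] (fun l => l ++ [title]) := by
  dsimp only
  rw [pv_fold_char title cats pvDocPrefixes]
  cases hf : pvDocPrefixes.find? (fun p => PySem.Str.startswith title p.2) with
  | some p =>
    rw [pv_classify_of_prefix title p.1 p.2 (by simpa using List.mem_of_find?_eq_some hf)
      (by simpa using List.find?_some hf)]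
    simp
  | none =>
    rw [pv_classify_none title (fun cp hcp => by simpa using List.find?_eq_none.mp hf cp hcp)]
    simp

-- ===== VERDICT (by name: the statement is the Claim_ definition above) =====
theorem categorize_docs_py_spec : Claim_equal_categorize_docs_py := by
  intro titles _
  unfold Spec_categorize_docs_py categorize_docs_py categorize_docs_py_alt
  dsimp only
  congr 1
  apply List.foldl_ext
  intro cats title _
  exact pv_step_eq cats title
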